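-- pv_equiv track=rewrite | github.com/creativecommons/ccos-scripts | ccos/log.py | identify_cut
-- ===== SOURCE A (Python) =====
-- def identify_cut(filenames):
--     """
--     Identify the depth at which the invoking function can be located. The
--     invoking function would be the first occurrence of a file just after
--     all stack filenames from within Python libs itself.
--     @param filenames: the names of all files from which logs were pushed
--     @return: the index of the filename from which the logger was called
--     """
--     lib_string = "lib/python"
--     lib_started = False
--     for index, filename in enumerate(filenames):
--         if not lib_started and lib_string in filename:
--             lib_started = True
--         if lib_started and lib_string not in filename:
--             return index
-- ===== SOURCE B (Python) =====
-- def identify_cut(filenames):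
--     # The cut is exactly the first adjacent lib->non-lib boundary: stateless
--     # pairwise check, no flag and no separate find-start phase.
--     lib_string = "lib/python"
--     for index, (prev, cur) in enumerate(zip(filenames, filenames[1:]), 1):
--         if lib_string in prev and lib_string not in cur:
--             return index
--     return None
-- ===== Notes on version B (the rewrite author's own statement) =====
-- stated objective: alternative
-- what changed: Replaces A's flag-driven state machine with a stateless scan over adjacent pairs: the result is the first index whose predecessor contains 'lib/python' and which does not, so B checks zip(filenames, filenames[1:]) for the first lib->non-lib boundary.
import Mathlib
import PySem

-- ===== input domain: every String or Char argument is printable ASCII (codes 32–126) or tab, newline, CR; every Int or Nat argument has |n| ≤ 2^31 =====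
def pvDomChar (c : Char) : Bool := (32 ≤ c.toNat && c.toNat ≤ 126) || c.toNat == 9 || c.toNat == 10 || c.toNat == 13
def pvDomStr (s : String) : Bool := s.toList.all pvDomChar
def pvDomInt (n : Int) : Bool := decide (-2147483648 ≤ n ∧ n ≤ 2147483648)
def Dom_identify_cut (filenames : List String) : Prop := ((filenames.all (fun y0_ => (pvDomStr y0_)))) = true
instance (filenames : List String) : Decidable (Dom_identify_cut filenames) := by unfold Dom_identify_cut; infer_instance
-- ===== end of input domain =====

-- B replaces A's flag-driven state machine with a stateless adjacent-pair scan for the first lib->non-lib boundary (same cost, different characterisation).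


-- ===== PORT A =====
-- A's loop: index counter, lib_started flag, two sequential if-checks per element.
def identifyCutLoop (i : Int) (libStarted : Bool) : List String → Option Int
  | [] => none
  | f :: rest =>
    let libStarted := if !libStarted && PySem.Str.isIn "lib/python" f then true else libStarted
    if libStarted && !PySem.Str.isIn "lib/python" f then some i
    else identifyCutLoop (i + 1) libStarted rest

def identify_cut (filenames : List String) : Option Int :=
  identifyCutLoop 0 false filenames

-- ===== PORT B =====
-- B's loop over enumerate(zip(filenames, filenames[1:]), 1): first adjacent (lib, non-lib) pair.
def identifyCutPairs (i : Int) : List (String × String) → Option Int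
  | [] => none
  | (prev, cur) :: rest =>
    if PySem.Str.isIn "lib/python" prev && !PySem.Str.isIn "lib/python" cur then some i
    else identifyCutPairs (i + 1) rest

def identify_cut_alt (filenames : List String) : Option Int :=
  identifyCutPairs 1 (filenames.zip (filenames.drop 1))

-- ===== PRECONDITION & SPEC =====
def Spec_identify_cut (filenames : List String) (out : Option Int) : Prop := out = identify_cut_alt filenames
instance (filenames : List String) (out : Option Int) : Decidable (Spec_identify_cut filenames out) := by unfold Spec_identify_cut; infer_instance

-- ===== CLAIM (what is proved, stated in full; the proofs are below) =====
def Claim_equal_identify_cut : Prop := ∀ (filenames : List String), Dom_identify_cut filenames → Spec_identify_cut filenames (identify_cut filenames)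

-- ===== LEMMAS AND PROOFS =====
-- In the lib-started state headed by a lib element g, A's remaining loop agrees with
-- B's pair scan over the pairs of (g :: rest).
theorem identifyCutLoop_true (rest : List String) : ∀ (i : Int) (g : String),
    PySem.Str.isIn "lib/python" g = true →
    identifyCutLoop (i + 1) true rest
      = identifyCutPairs (i + 1) ((g :: rest).zip rest) := by
  induction rest with
  | nil => intro i g _; simp [identifyCutLoop, identifyCutPairs]
  | cons c rest' ih =>
    intro i g hg
    by_cases hc : PySem.Str.isIn "lib/python" c
    · rw [show identifyCutLoop (i + 1) true (c :: rest') = identifyCutLoop (i + 2) true rest' by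
        simp only [identifyCutLoop, hc]; simp; ring_nf]
      rw [show identifyCutPairs (i + 1) ((g :: c :: rest').zip (c :: rest'))
            = identifyCutPairs (i + 2) ((c :: rest').zip rest') by
        simp only [List.zip_cons_cons, identifyCutPairs, hg, hc]; simp; ring_nf]
      have := ih (i + 1) c hc
      simpa [add_assoc] using this
    · have hc' : PySem.Str.isIn "lib/python" c = false := by simpa using hc
      rw [show identifyCutLoop (i + 1) true (c :: rest') = some (i + 1) by
        simp only [identifyCutLoop, hc']; simp]
      simp only [List.zip_cons_cons, identifyCutPairs, hg, hc']
      simp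

-- Before lib has started, A's loop agrees with B's pair scan on the remaining pairs.
theorem identifyCutLoop_false (fs : List String) : ∀ (i : Int),
    identifyCutLoop i false fs = identifyCutPairs (i + 1) (fs.zip (fs.drop 1)) := by
  induction fs with
  | nil => intro i; simp [identifyCutLoop, identifyCutPairs]
  | cons f rest ih =>
    intro i
    by_cases hf : PySem.Str.isIn "lib/python" f
    · rw [show identifyCutLoop i false (f :: rest) = identifyCutLoop (i + 1) true rest by
        simp only [identifyCutLoop, hf]; simp]
      rw [identifyCutLoop_true rest i f hf]
      simp
    · have hf' : PySem.Str.isIn "lib/python" f = false := by simpa using hf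
      rw [show identifyCutLoop i false (f :: rest) = identifyCutLoop (i + 1) false rest by
        simp only [identifyCutLoop, hf']; simp]
      rw [ih (i + 1)]
      cases rest with
      | nil => simp [identifyCutPairs]
      | cons g rest' =>
        simp only [List.drop_succ_cons, List.drop_zero, List.zip_cons_cons, identifyCutPairs,
          hf', Bool.false_and, Bool.false_eq_true, if_false]

-- ===== VERDICT (by name: the statement is the Claim_ definition above) =====
theorem identify_cut_spec : Claim_equal_identify_cut := by
  intro fs _
  unfold Spec_identify_cut identify_cut identify_cut_alt
  rw [identifyCutLoop_false fs 0]
  norm_num
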